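-- pv_equiv track=rewrite | github.com/joaopalotti/sleep_boundary_project | src/NN_model_from_pycaret_with_2lables_mainY_and_percentageY.py | get_number_internal_layers
-- ===== SOURCE A (Python) =====
-- def get_number_internal_layers(n, output_size):
--     """
--     E.g.:
--         get_number_internal_layers(20, 3) --> [16, 8, 4]
--         get_number_internal_layers(192, 16) # --> [128, 64, 32]
--     """
--     i = 1; d = 2; s = []
--     while (n - 1) / d > 1:
--         s.append(d)
--         i += 1
--         d = 2**i;
--
--     s = [e for e in s if e > output_size]
--     return s[::-1]
-- ===== SOURCE B (Python) =====
-- def get_number_internal_layers(n, output_size):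
--     # Closed-form exponent window: powers 2**i with 2**i < n-1 and 2**i > output_size, descending.
--     m = n - 2
--     if m < 2:
--         return []
--     hi = m.bit_length() - 1                      # largest i with 2**i <= n-2
--     lo = 1 if output_size < 2 else output_size.bit_length()   # smallest i >= 1 with 2**i > output_size
--     return [2 ** i for i in range(hi, lo - 1, -1)]
-- ===== Notes on version B (the rewrite author's own statement) =====
-- stated objective: simpler
-- what changed: B computes the exponent window in closed form via bit_length (largest i with 2^i < n-1, smallest i>=1 with 2^i > output_size) and emits the descending powers directly, instead of A's grow-then-filter-then-reverse loop.
import Mathlib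
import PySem

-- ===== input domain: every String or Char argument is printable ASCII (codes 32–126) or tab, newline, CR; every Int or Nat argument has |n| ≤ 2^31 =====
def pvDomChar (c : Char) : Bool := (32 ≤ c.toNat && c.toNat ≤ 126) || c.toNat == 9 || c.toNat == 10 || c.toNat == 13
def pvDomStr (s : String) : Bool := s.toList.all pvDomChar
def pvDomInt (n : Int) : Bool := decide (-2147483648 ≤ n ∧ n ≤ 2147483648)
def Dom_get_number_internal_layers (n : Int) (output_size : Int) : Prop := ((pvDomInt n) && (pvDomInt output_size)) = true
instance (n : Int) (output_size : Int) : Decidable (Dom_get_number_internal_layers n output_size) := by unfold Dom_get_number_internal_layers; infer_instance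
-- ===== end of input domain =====

-- B replaces A's grow/filter/reverse loop by a closed-form exponent window computed with
-- bit_length, emitting the descending powers directly (objective: simpler).

-- ===== PORT A =====
-- A's loop: while (n-1)/d > 1, with d = 2**i maintained by the loop.  Python's '/' is float
-- true division; for |n| ≤ 2^31 (the Dom bound) n-1 is exactly representable and division by
-- the power of two d is exact, so the guard '(n-1)/d > 1' is exactly 'n-1 > d' — ported so.
-- The loop state d = 2**i is carried via the exponent i (a Nat since i = 1, 2, 3, …).
def pvLoopA (n : Int) (i : Nat) (s : List Int) : List Int :=
  if _h : n - 1 > (2 : Int) ^ i then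
    pvLoopA n (i + 1) (s ++ [(2 : Int) ^ i])
  else s
  termination_by (n - 1).toNat - i
  decreasing_by
    have h1 : (i : Int) + 1 ≤ (2 : Int) ^ i := by
      have := Nat.lt_two_pow_self (n := i)
      have : (i : Int) < (2 : Int) ^ i := by exact_mod_cast this
      omega
    omega

def get_number_internal_layers (n : Int) (output_size : Int) : List Int :=
  -- i = 1; d = 2; s = []; loop; then the filter comprehension; s[::-1] is List.reverse (exact)
  ((pvLoopA n 1 []).filter (fun e => output_size < e)).reverse

-- ===== PORT B =====
-- x.bit_length() for x ≥ 1 is log2(x)+1, ported as Nat.log 2; B only calls it on ints ≥ 2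
-- (and the 0 branch matches Python's bit_length at 0).
def pvBitLength (x : Int) : Int := if x ≤ 0 then 0 else (Nat.log 2 x.toNat : Int) + 1

def get_number_internal_layers_alt (n : Int) (output_size : Int) : List Int :=
  let m := n - 2
  if m < 2 then []
  else
    let hi := pvBitLength m - 1
    let lo := if output_size < 2 then 1 else pvBitLength output_size
    (PySem.List.pyRange hi (lo - 1) (-1)).map (fun i => (2 : Int) ^ i.toNat)

-- ===== PRECONDITION & SPEC =====
def Spec_get_number_internal_layers (n : Int) (output_size : Int) (out : List Int) : Prop := out = get_number_internal_layers_alt n output_size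
instance (n : Int) (output_size : Int) (out : List Int) : Decidable (Spec_get_number_internal_layers n output_size out) := by unfold Spec_get_number_internal_layers; infer_instance

-- ===== CLAIM (what is proved, stated in full; the proofs are below) =====
def Claim_equal_get_number_internal_layers : Prop := ∀ (n : Int) (output_size : Int), Dom_get_number_internal_layers n output_size → Spec_get_number_internal_layers n output_size (get_number_internal_layers n output_size)

-- ===== LEMMAS AND PROOFS =====

-- A's loop collects 2^1, …, 2^h where h = log2(n-2) (for n-2 ≥ 2).
theorem pvLoopA_char (n : Int) (h : Nat) (hm : 2 ≤ n - 2)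
    (hlow : (2 : Int) ^ h ≤ n - 2) (hhigh : n - 2 < (2 : Int) ^ (h + 1)) :
    ∀ (i : Nat) (s : List Int),
      pvLoopA n i s = s ++ (List.range' i (h + 1 - i)).map (fun j => (2 : Int) ^ j) := by
  intro i s
  induction i, s using pvLoopA.induct n with
  | case1 i s hcond ih =>
    rw [pvLoopA, dif_pos hcond, ih]
    have hile : i ≤ h := by
      by_contra hc
      have : h + 1 ≤ i := by omega
      have : (2 : Int) ^ (h + 1) ≤ (2 : Int) ^ i := by
        apply pow_le_pow_right₀ (by norm_num) this
      omega
    have : h + 1 - i = (h - i) + 1 := by omega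
    rw [this, List.range'_succ, List.map_cons, List.append_assoc]
    simp only [List.singleton_append]
    have : h + 1 - (i + 1) = h - i := by omega
    rw [this]
  | case2 i s hcond =>
    rw [pvLoopA, dif_neg hcond]
    have : i > h := by
      by_contra hc
      have hile : i ≤ h := by omega
      have : (2 : Int) ^ i ≤ (2 : Int) ^ h := by
        apply pow_le_pow_right₀ (by norm_num) hile
      omega
    have : h + 1 - i = 0 := by omega
    rw [this]
    simp

-- filtering an ascending index range by a monotone threshold keeps the tail
theorem filter_range'_ge (c : Nat) : ∀ (a b : Nat), a ≤ c →
    (List.range' a b).filter (fun j => decide (c ≤ j)) = List.range' c (a + b - c) := by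
  intro a b
  induction b generalizing a with
  | zero => intro hac; simp; omega
  | succ b ih =>
    intro hac
    rw [List.range'_succ, List.filter_cons]
    by_cases hca : c ≤ a
    · have hca' : c = a := by omega
      subst hca'
      simp only [decide_true, le_refl, if_true]
      have : (List.range' (c + 1) b).filter (fun j => decide (c ≤ j)) = List.range' (c + 1) b := by
        apply List.filter_eq_self.mpr
        intro x hx
        have := List.mem_range'_1.mp hx
        simp; omega
      rw [this, show c + (b + 1) - c = b + 1 by omega, List.range'_succ]
    · simp only [decide_eq_true_eq, hca, if_false]
      rw [ih (a + 1) (by omega)]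
      congr 1
      omega

theorem pow_toNat_int (a : Int) (k : Nat) (ha : 0 ≤ a) :
    (2 : Int) ^ (a + (k : Int)).toNat = (2 : Int) ^ (a.toNat + k) := by
  congr 1
  omega

-- ===== VERDICT (by name: the statement is the Claim_ definition above) =====
theorem get_number_internal_layers_spec : Claim_equal_get_number_internal_layers := by
  intro n os _hdom
  unfold Spec_get_number_internal_layers get_number_internal_layers get_number_internal_layers_alt
  by_cases hm : n - 2 < 2
  · -- loop guard n - 1 > 2 fails immediately
    rw [pvLoopA, dif_neg (by omega)]
    simp [hm]
  · push_neg at hm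
    rw [if_neg (by omega)]
    -- h = log2 (n-2)
    set M : Nat := (n - 2).toNat with hM
    have hM2 : 2 ≤ M := by omega
    set h : Nat := Nat.log 2 M with hh
    have hlow : (2 : Int) ^ h ≤ n - 2 := by
      have := Nat.pow_log_le_self 2 (show M ≠ 0 by omega)
      have : ((2 : ℕ) ^ h : Int) ≤ (M : Int) := by exact_mod_cast this
      push_cast at this
      omega
    have hhigh : n - 2 < (2 : Int) ^ (h + 1) := by
      have := Nat.lt_pow_succ_log_self (b := 2) (by norm_num) M
      have : (M : Int) < ((2 : ℕ) ^ (h + 1) : Int) := by exact_mod_cast this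
      push_cast at this
      omega
    rw [pvLoopA_char n h hm hlow hhigh 1 []]
    -- define the low cutoff loN
    set loN : Nat := if os < 2 then 1 else Nat.log 2 os.toNat + 1 with hloN
    have hlo1 : 1 ≤ loN := by rw [hloN]; split <;> omega
    -- the filter predicate on elements 2^j (j ≥ 1) is loN ≤ j
    have hpred : ∀ j : Nat, 1 ≤ j → (os < (2 : Int) ^ j ↔ loN ≤ j) := by
      intro j hj
      rw [hloN]
      by_cases hos : os < 2
      · simp only [hos, if_true]
        constructor
        · intro _; omega
        · intro _
          have : (2 : Int) ^ 1 ≤ (2 : Int) ^ j := pow_le_pow_right₀ (by norm_num) hj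
          omega
      · simp only [hos, if_false]
        push_neg at hos
        have hosN : os.toNat = os := by omega
        constructor
        · intro hlt
          have : os.toNat < 2 ^ j := by
            have : (os : Int) < ((2 : ℕ) ^ j : Int) := by push_cast; omega
            omega
          have hlog : Nat.log 2 os.toNat < j := by
            by_contra hc
            push_neg at hc
            have h1 : 2 ^ j ≤ 2 ^ Nat.log 2 os.toNat := Nat.pow_le_pow_right (by norm_num) hc
            have h2 := Nat.pow_log_le_self 2 (show os.toNat ≠ 0 by omega)
            omega
          omega
        · intro hle
          have hlog : Nat.log 2 os.toNat < j := by omega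
          have : os.toNat < 2 ^ j := (Nat.log_lt_iff_lt_pow (by norm_num) (by omega)).mp hlog
          have : (os : Int) < ((2 : ℕ) ^ j : Int) := by omega
          push_cast at this
          omega
    -- rewrite the filter over the mapped range
    have hfilter : (((List.range' 1 h).map (fun j => (2 : Int) ^ j)).filter (fun e => decide (os < e)))
        = (List.range' loN (1 + h - loN)).map (fun j => (2 : Int) ^ j) := by
      rw [List.filter_map]
      have : ((fun e => decide (os < e)) ∘ fun j : Nat => (2 : Int) ^ j)
          = fun j : Nat => decide (os < (2 : Int) ^ j) := rfl
      rw [this]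
      have hfc : (List.range' 1 h).filter (fun j : Nat => decide (os < (2 : Int) ^ j))
          = (List.range' 1 h).filter (fun j : Nat => decide (loN ≤ j)) := by
        apply List.filter_congr
        intro j hj
        have hj1 : 1 ≤ j := (List.mem_range'_1.mp hj).1
        simp [hpred j hj1]
      rw [hfc, filter_range'_ge loN 1 h hlo1]
    show (((List.range' 1 (h + 1 - 1)).map (fun j => (2 : Int) ^ j)).filter (fun e => decide (os < e))).reverse
        = (PySem.List.pyRange (pvBitLength (n - 2) - 1) ((if os < 2 then (1 : Int) else pvBitLength os) - 1) (-1)).map (fun i => (2 : Int) ^ i.toNat)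
    rw [Nat.add_sub_cancel, hfilter]
    -- B side: pyRange hi (lo-1) (-1) with hi = h, lo = loN
    have hbl_m : pvBitLength (n - 2) - 1 = (h : Int) := by
      unfold pvBitLength
      rw [if_neg (by omega)]
      have : (n - 2).toNat = M := rfl
      rw [this, ← hh]; ring
    have hbl_lo : (if os < 2 then (1 : Int) else pvBitLength os) = (loN : Int) := by
      rw [hloN]
      by_cases hos : os < 2
      · simp [hos]
      · simp only [hos, if_false]
        unfold pvBitLength
        rw [if_neg (by omega)]
        push_cast; ring
    rw [hbl_m, hbl_lo]
    rw [PySem.List.pyRange_neg_one_eq_reverse, List.map_reverse, List.reverse_inj]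
    rw [PySem.List.pyRange_one]
    rw [show ((loN : Int) - 1 + 1) = (loN : Int) by ring,
        show ((h : Int) + 1 - (loN : Int)).toNat = 1 + h - loN by omega]
    rw [List.range'_eq_map_range, List.map_map, List.map_map]
    apply List.map_congr_left
    intro k hk
    simp only [Function.comp_apply]
    rw [pow_toNat_int (loN : Int) k (by omega)]
    congr 1
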